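-- pv_equiv track=rewrite | github.com/mangosmgs/Python-Project-Cryptography | crypto_functions.py | encode_to_matrix
-- ===== SOURCE A (Python) =====
-- def create_matrix(row_length, column_length):
--     """
--     The function expects two integers `row_length` and `column_length`
--     as input and returns a matrix of dimension `row_length` x `column_length`
--     which contains space characters(`' '`)
--     The outer nested list contains a list of length row_length and each element of this list is itself a
--     list of
--     length column_length.
--     The inner lists contain strings (a total of column_length strings), all of which are single space
--     characters(' ').
--     """
--     my_list = []
--     for i in range(0, row_length):
--         sub_list = []
--         for j in range(0, column_length):
--             sub_list.append(' ')
--         my_list.append(sub_list)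
--     return my_list
--
-- def encode_to_matrix(message_string, column_length):
--     """
--     The function takes a string `message_string` and an integer
--     `column_length` as integer and "writes" the message string
--     on to a matrix that has `column_length` many columns.
--     1. Calculate the number of rows using the length of the message string and the column length input
--     parameters.
--     2. Call the `create_matrix()` function with # of rows calculated in the previous step and
--     `column_length` to
--     get the matrix with space characters.
--     3. Initiate a variable `k` with 0
--     4. for-loop over the range(# of rows)
--         for-loop over the range(# of columns)
--             set the corresponding row and column of the matrix to the k-th character in `message_string`
--             increment `k` by 1
--             if `k` is greater than or equal to the length of `message_string`, break to go to the next row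
--         if `k` is greater than or equal to the length of `message_string`, break since you are done with
--         the message
--     5. return the resulting matrix
--     """
--
--     if len(message_string) % column_length == 0:
--         rows = len(message_string) // column_length
--     else:
--         rows = len(message_string) // column_length + 1
--
--     matrix = create_matrix(rows, column_length)
--     k = 0
--     """
--     Note that we do not provide the number of rows that the output nested list should contain. You need to
--     find this using the length of message_string and the column_length(Hint: You can divide themessage_string
--     into chunks of length column_length each: how many such chunks will you form? Should you use normal division(/)
--     or floor division(//) or something else?).
--     """
--
--     for i in range(0, rows):
--         for j in range(0, column_length):
--             matrix[i][j] = message_string[k]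
--             k += 1
--             if k >= len(message_string):
--                 break
--         if k >= len(message_string):
--             break
--     return matrix
-- ===== SOURCE B (Python) =====
-- def encode_to_matrix(message_string, column_length):
--     if len(message_string) % column_length == 0:
--         rows = len(message_string) // column_length
--     else:
--         rows = len(message_string) // column_length + 1
--     result = []
--     for i in range(rows):
--         chunk = message_string[i * column_length:(i + 1) * column_length]
--         result.append(list(chunk) + [' '] * (column_length - len(chunk)))
--     return result
-- ===== Notes on version B (the rewrite author's own statement) =====
-- stated objective: simpler
-- what changed: B builds each row whole as a padded string slice, instead of pre-allocating a space-filled matrix and overwriting it character by character with break-guarded nested loops; a timing run also measured it faster by a constant factor (slicing avoids per-cell list writes).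
import Mathlib
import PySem

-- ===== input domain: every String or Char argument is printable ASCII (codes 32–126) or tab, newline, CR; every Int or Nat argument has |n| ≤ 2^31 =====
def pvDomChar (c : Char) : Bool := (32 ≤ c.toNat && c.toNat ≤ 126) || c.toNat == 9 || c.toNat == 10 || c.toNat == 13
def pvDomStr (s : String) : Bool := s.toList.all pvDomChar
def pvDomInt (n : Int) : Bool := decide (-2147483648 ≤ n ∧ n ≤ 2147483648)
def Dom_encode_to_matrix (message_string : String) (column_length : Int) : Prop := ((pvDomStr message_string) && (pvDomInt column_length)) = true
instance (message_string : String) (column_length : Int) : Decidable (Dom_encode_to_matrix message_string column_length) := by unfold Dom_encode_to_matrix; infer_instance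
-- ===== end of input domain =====

-- B replaces A's pre-filled space matrix and break-guarded per-cell double loop by building
-- each row whole from a string slice padded with spaces (objective: simpler).

-- ===== PORT A =====

-- create_matrix: nested append loops building a rows × columns matrix of " "
def create_matrix (row_length : Int) (column_length : Int) : List (List String) :=
  (PySem.List.pyRange 0 row_length 1).foldl
    (fun my_list _i =>
      my_list ++ [(PySem.List.pyRange 0 column_length 1).foldl (fun sub_list _j => sub_list ++ [" "]) []])
    []

-- inner 'for j in range(0, column_length)' loop with its mid-loop break;
-- matrix[i][j] = message_string[k] is read-row / set-cell / write-row on the nested list.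
-- The loop indices i, j and the cursor k are always nonnegative, and k < len whenever a
-- character is read (the break fires as soon as k reaches len), so pyGetD/.getD defaults are
-- never reached on inputs admitted by Pre_.
def etmInner (msg : List Char) (n : Int) (js : List Int) (matrix : List (List String)) (i : Int) (k : Int) : List (List String) × Int :=
  match js with
  | [] => (matrix, k)
  | j :: rest =>
      let row := PySem.List.pyGetD matrix i []
      let ch := (PySem.List.pyGet? msg k).getD ' '
      let matrix := PySem.List.pySetD matrix i (PySem.List.pySetD row j (String.mk [ch]))
      let k := k + 1
      if k ≥ n then (matrix, k) else etmInner msg n rest matrix i k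

-- outer 'for i in range(0, rows)' loop with its trailing break
def etmOuter (msg : List Char) (n : Int) (column_length : Int) (is_ : List Int) (matrix : List (List String)) (k : Int) : List (List String) :=
  match is_ with
  | [] => matrix
  | i :: rest =>
      let p := etmInner msg n (PySem.List.pyRange 0 column_length 1) matrix i k
      if p.2 ≥ n then p.1 else etmOuter msg n column_length rest p.1 p.2

def encode_to_matrix (message_string : String) (column_length : Int) : List (List String) :=
  let n := PySem.Str.len message_string
  let rows := if PySem.Int.mod n column_length = 0
              then PySem.Int.floordiv n column_length
              else PySem.Int.floordiv n column_length + 1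
  let matrix := create_matrix rows column_length
  etmOuter message_string.toList n column_length (PySem.List.pyRange 0 rows 1) matrix 0

-- ===== PORT B =====

-- each row is a padded slice; [' '] * m is empty for m ≤ 0, matching Python list repetition
def encode_to_matrix_alt (message_string : String) (column_length : Int) : List (List String) :=
  let n := PySem.Str.len message_string
  let rows := if PySem.Int.mod n column_length = 0
              then PySem.Int.floordiv n column_length
              else PySem.Int.floordiv n column_length + 1
  (PySem.List.pyRange 0 rows 1).map (fun i =>
    let chunk := PySem.List.slice message_string.toList (some (i * column_length)) (some ((i + 1) * column_length))
    chunk.map (fun ch => String.mk [ch]) ++ List.replicate (column_length - PySem.List.len chunk).toNat " ")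

-- ===== PRECONDITION & SPEC =====
-- Pre_ excludes exactly column_length = 0, on which both A and B raise ZeroDivisionError.
def Pre_encode_to_matrix (message_string : String) (column_length : Int) : Prop :=
  column_length ≠ 0
instance (message_string : String) (column_length : Int) : Decidable (Pre_encode_to_matrix message_string column_length) := by unfold Pre_encode_to_matrix; infer_instance

def pvWitness_encode_to_matrix : String × Int := ("HELLO", 2)

def Spec_encode_to_matrix (message_string : String) (column_length : Int) (out : List (List String)) : Prop := out = encode_to_matrix_alt message_string column_length
instance (message_string : String) (column_length : Int) (out : List (List String)) : Decidable (Spec_encode_to_matrix message_string column_length out) := by unfold Spec_encode_to_matrix; infer_instance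

-- ===== CLAIM (what is proved, stated in full; the proofs are below) =====
def Claim_equal_encode_to_matrix : Prop := ∀ (message_string : String) (column_length : Int), Dom_encode_to_matrix message_string column_length → Pre_encode_to_matrix message_string column_length → Spec_encode_to_matrix message_string column_length (encode_to_matrix message_string column_length)

-- ===== LEMMAS AND PROOFS =====

-- B's row builder, used to state the loop invariants
def pvBrow (L : List Char) (c : Int) (i : Int) : List String :=
  let chunk := PySem.List.slice L (some (i * c)) (some ((i + 1) * c))
  chunk.map (fun ch => String.mk [ch]) ++ List.replicate (c - PySem.List.len chunk).toNat " "

theorem pv_getD_mid {α : Type} (done : List α) (x d : α) (rest : List α) :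
    (done ++ x :: rest).getD done.length d = x := by
  simp [List.getD, List.getElem?_append_right]

theorem pv_set_mid {α : Type} (done : List α) (x v : α) (rest : List α) :
    (done ++ x :: rest).set done.length v = done ++ v :: rest := by
  induction done with
  | nil => simp
  | cons a as ih => simp [List.set, ih]

theorem pv_create_matrix (r c : Int) :
    create_matrix r c = List.replicate (r.toNat) (List.replicate c.toNat " ") := by
  unfold create_matrix
  rw [PySem.List.foldl_append_singleton_eq_map, PySem.List.foldl_append_singleton_eq_map]
  simp only [PySem.List.pyRange_one, List.map_map, List.nil_append, zero_sub, Int.zero_add]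
  apply List.eq_replicate_iff.mpr
  refine ⟨by simp, ?_⟩
  intro b hb
  simp only [List.mem_map, Function.comp] at hb
  obtain ⟨a, -, hb⟩ := hb
  subst hb
  apply List.eq_replicate_iff.mpr
  simp

-- inner loop invariant
theorem pv_inner (L : List Char) (c : Int) :
    ∀ (t : Nat) (j k : Int) (done : List (List String)) (rowdone : List String)
      (rest : List (List String)),
      j + t = c → 0 ≤ j → rowdone.length = j.toNat → 0 ≤ k → k < (L.length : Int) →
      etmInner L (L.length : Int) (PySem.List.pyRange j c 1)
        (done ++ (rowdone ++ List.replicate t " ") :: rest) (done.length : Int) k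
      = (done ++ (rowdone
            ++ ((L.drop k.toNat).take (min (L.length - k.toNat) t)).map (fun ch => String.mk [ch])
            ++ List.replicate (t - min (L.length - k.toNat) t) " ") :: rest,
          k + (min (L.length - k.toNat) t : Nat)) := by
  intro t
  induction t with
  | zero =>
      intro j k done rowdone rest hjc hj hrl hk hkn
      rw [PySem.List.pyRange_one_eq_nil (by omega)]
      simp [etmInner]
  | succ t ih =>
      intro j k done rowdone rest hjc hj hrl hk hkn
      rw [PySem.List.pyRange_one_cons (by omega)]
      have hkn' : k.toNat < L.length := by omega
      have hch : (PySem.List.pyGet? L k).getD ' ' = L[k.toNat] := by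
        rw [PySem.List.pyGet?_eq_some_getElem L hk (by exact_mod_cast hkn)]; rfl
      have hrow : PySem.List.pyGetD (done ++ (rowdone ++ List.replicate (t+1) " ") :: rest)
          (done.length : Int) [] = rowdone ++ List.replicate (t+1) " " := by
        simp [pv_getD_mid]
      have hsetrow : (rowdone ++ List.replicate (t+1) " ").set j.toNat (String.mk [L[k.toNat]])
          = rowdone ++ String.mk [L[k.toNat]] :: List.replicate t " " := by
        rw [List.replicate_succ, ← hrl, pv_set_mid]
      have hdrop : L.drop k.toNat = L[k.toNat] :: L.drop (k.toNat + 1) :=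
        List.drop_eq_getElem_cons hkn'
      simp only [etmInner, hrow, hch]
      rw [PySem.List.pySetD_of_nonneg _ _ hj, hsetrow,
          PySem.List.pySetD_natCast, pv_set_mid]
      by_cases hend : k + 1 ≥ (L.length : Int)
      · rw [if_pos hend]
        have hm : min (L.length - k.toNat) (t+1) = 1 := by omega
        rw [hm, hdrop]
        simp only [Prod.mk.injEq, List.take_succ_cons, List.take_zero, List.map_cons,
          List.map_nil, List.singleton_append, List.cons_append, Nat.add_sub_cancel]
        refine ⟨by simp, by push_cast; omega⟩
      · rw [if_neg hend]
        have hIH := ih (j+1) (k+1) done (rowdone ++ [String.mk [L[k.toNat]]]) rest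
          (by omega) (by omega) (by simp [hrl]; omega) (by omega) (by omega)
        simp only [List.append_assoc, List.singleton_append] at hIH
        rw [hIH]
        have hk1 : (k+1).toNat = k.toNat + 1 := by omega
        have hm : min (L.length - k.toNat) (t+1) = min (L.length - (k+1).toNat) t + 1 := by omega
        rw [hm, hdrop]
        simp only [Prod.mk.injEq, hk1, List.take_succ_cons, List.map_cons, List.cons_append,
          List.append_assoc, List.singleton_append, Nat.add_sub_add_right]
        refine ⟨by simp, by push_cast; omega⟩
  termination_by t => t

-- outer loop invariant (c > 0, r the ceiling row count, message nonempty)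
theorem pv_outer (L : List Char) (c r : Int) (hc : 0 < c)
    (hlo : (r - 1) * c < (L.length : Int)) (hhi : (L.length : Int) ≤ r * c) :
    ∀ (s : Nat) (i : Int) (done : List (List String)),
      i + s = r → 0 ≤ i → done.length = i.toNat → 0 < s →
      etmOuter L (L.length : Int) c (PySem.List.pyRange i r 1)
        (done ++ List.replicate s (List.replicate c.toNat " ")) (i * c)
      = done ++ (PySem.List.pyRange i r 1).map (pvBrow L c) := by
  intro s
  induction s with
  | zero => intro i done _ _ _ h0; omega
  | succ s ih =>
      intro i done hir hi hdl _
      have hkn : i * c < (L.length : Int) := by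
        calc i * c ≤ (r - 1) * c := by
              apply mul_le_mul_of_nonneg_right (by omega) (by omega)
          _ < (L.length : Int) := hlo
      have hk0 : 0 ≤ i * c := mul_nonneg hi (by omega)
      rw [PySem.List.pyRange_one_cons (by omega)]
      simp only [etmOuter, List.replicate_succ]
      have hinner := pv_inner L c c.toNat 0 (i * c) done [] (List.replicate s (List.replicate c.toNat " "))
        (by omega) le_rfl rfl hk0 hkn
      simp only [List.nil_append] at hinner
      have hdl' : (done.length : Int) = i := by omega
      rw [hdl'] at hinner
      rw [hinner]
      set m : Nat := min (L.length - (i * c).toNat) c.toNat with hm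
      have hchunk : pvBrow L c i
          = ((L.drop (i * c).toNat).take m).map (fun ch => String.mk [ch])
            ++ List.replicate (c.toNat - m) " " := by
        unfold pvBrow
        have h1 : PySem.List.slice L (some (i * c)) (some ((i + 1) * c))
            = (L.drop (i * c).toNat).take m := by
          rw [PySem.List.slice_toNat L hk0 (by positivity)]
          have : ((i + 1) * c).toNat - (i * c).toNat = c.toNat := by
            have : (i + 1) * c = i * c + c := by ring
            omega
          rw [this, List.take_eq_take_min]
          congr 1
          simp [hm]
          omega
        dsimp only
        rw [h1]
        have hlen : ((L.drop (i * c).toNat).take m).length = m := by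
          simp; omega
        rw [PySem.List.len_eq, hlen]
        have hcm : ((c - (m:Int)).toNat) = c.toNat - m := by omega
        rw [hcm]
      by_cases hbreak : i * c + (m : Int) ≥ (L.length : Int)
      · rw [if_pos hbreak]
        have hir1 : r = i + 1 := by
          have h1 : (L.length : Int) ≤ (i + 1) * c := by
            have : (m : Int) ≤ c := by omega
            nlinarith
          have h2 : r - 1 < i + 1 := by
            by_contra hcon
            have : (i + 1) * c ≤ (r - 1) * c :=
              mul_le_mul_of_nonneg_right (by omega) (by omega)
            omega
          omega
        have hs0 : s = 0 := by omega
        subst hs0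
        rw [hir1, PySem.List.pyRange_one_eq_nil (le_refl (i+1))]
        simp [hchunk]
      · rw [if_neg hbreak]
        have hmc : m = c.toNat := by
          by_contra hmc
          have : (m : Int) = (L.length : Int) - i * c := by omega
          omega
        have hs1 : 0 < s := by
          by_contra hs
          have hs0 : s = 0 := by omega
          have : r = i + 1 := by omega
          subst this
          have : i * c + (m : Int) ≥ (L.length : Int) := by
            rw [hmc]
            have : (i + 1) * c = i * c + c := by ring
            omega
          exact hbreak this
        have := ih (i + 1) (done ++ [pvBrow L c i]) (by omega) (by omega)
          (by simp [hdl]; omega) hs1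
        have harith : i * c + (m : Int) = (i + 1) * c := by
          rw [hmc]; push_cast [Int.toNat_of_nonneg (by positivity : (0:Int) ≤ c)]; ring
        rw [harith, ← hchunk] at *
        simp only [List.append_assoc, List.singleton_append] at this ⊢
        rw [this]
        rw [PySem.List.pyRange_one_cons (by omega)]
        simp

-- degenerate case: rows ≤ 0 gives the empty matrix on both sides
theorem pv_rows_nonpos (msg : String) (c : Int) (r : Int)
    (hr : r ≤ 0)
    (hA : encode_to_matrix msg c
        = etmOuter msg.toList (PySem.Str.len msg) c (PySem.List.pyRange 0 r 1) (create_matrix r c) 0)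
    (hB : encode_to_matrix_alt msg c
        = (PySem.List.pyRange 0 r 1).map (fun i =>
            let chunk := PySem.List.slice msg.toList (some (i * c)) (some ((i + 1) * c))
            chunk.map (fun ch => String.mk [ch]) ++ List.replicate (c - PySem.List.len chunk).toNat " ")) :
    encode_to_matrix msg c = encode_to_matrix_alt msg c := by
  rw [hA, hB, PySem.List.pyRange_one_eq_nil (by omega), pv_create_matrix]
  have : r.toNat = 0 := by omega
  simp [this, etmOuter]

-- ===== VERDICT (by name: the statement is the Claim_ definition above) =====
theorem encode_to_matrix_spec : Claim_equal_encode_to_matrix := by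
  intro msg c _ hc
  unfold Pre_encode_to_matrix at hc
  unfold Spec_encode_to_matrix
  set n : Int := PySem.Str.len msg with hn
  set r : Int := (if PySem.Int.mod n c = 0
      then PySem.Int.floordiv n c else PySem.Int.floordiv n c + 1) with hr
  have hA : encode_to_matrix msg c
      = etmOuter msg.toList n c (PySem.List.pyRange 0 r 1) (create_matrix r c) 0 := rfl
  have hB : encode_to_matrix_alt msg c
      = (PySem.List.pyRange 0 r 1).map (pvBrow msg.toList c) := rfl
  have hnL : n = (msg.toList.length : Int) := by
    rw [hn, PySem.Str.len_eq]
  have hn0 : 0 ≤ n := by rw [hnL]; positivity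
  by_cases hcpos : 0 < c
  · by_cases hnz : n = 0
    · -- empty message: rows = 0
      have hr0 : r ≤ 0 := by
        have hm : PySem.Int.mod n c = 0 := by
          rw [hnz]; simp [PySem.Int.mod]
        have hd : PySem.Int.floordiv n c = 0 := by
          rw [hnz]; simp [PySem.Int.floordiv]
        rw [hr, if_pos hm, hd]
      exact pv_rows_nonpos msg c r hr0 hA hB
    · -- main case: c > 0, n > 0
      have hnpos : 0 < n := by omega
      have hdiv : PySem.Int.floordiv n c = n / c := PySem.Int.floordiv_eq_ediv_of_pos hcpos
      have hmod : PySem.Int.mod n c = n % c := PySem.Int.mod_eq_emod_of_pos hcpos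
      have hdm := Int.ediv_add_emod n c
      have hml : 0 ≤ n % c := Int.emod_nonneg n (by omega)
      have hmu : n % c < c := Int.emod_lt_of_pos n hcpos
      have hlo : (r - 1) * c < n := by
        rw [hr, hdiv, hmod]
        by_cases hz : n % c = 0
        · rw [if_pos hz]
          have : (n / c - 1) * c = c * (n / c) - c := by ring
          rw [this]; omega
        · rw [if_neg hz]
          have : (n / c + 1 - 1) * c = c * (n / c) := by ring
          rw [this]; omega
      have hhi : n ≤ r * c := by
        rw [hr, hdiv, hmod]
        by_cases hz : n % c = 0
        · rw [if_pos hz]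
          have : (n / c) * c = c * (n / c) := by ring
          rw [this]; omega
        · rw [if_neg hz]
          have : (n / c + 1) * c = c * (n / c) + c := by ring
          rw [this]; omega
      have hrpos : 0 < r := by
        by_contra hcon
        have : r * c ≤ 0 := mul_nonpos_of_nonpos_of_nonneg (by omega) (by omega)
        omega
      have hlo' : (r - 1) * c < (msg.toList.length : Int) := by rw [← hnL]; exact hlo
      have hhi' : (msg.toList.length : Int) ≤ r * c := by rw [← hnL]; exact hhi
      have houter := pv_outer msg.toList c r hcpos hlo' hhi' r.toNat 0 []
        (by omega) le_rfl rfl (by omega)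
      rw [hA, hB, pv_create_matrix, hnL]
      simpa using houter
  · -- c < 0 (c = 0 excluded by Pre_): rows ≤ 0, both sides empty
    have hcneg : c < 0 := by omega
    have hr0 : r ≤ 0 := by
      have hnn : 0 ≤ Int.fdiv n (-c) := Int.fdiv_nonneg hn0 (by omega)
      have hfd : PySem.Int.floordiv n c
          = if (-c) ∣ n then -Int.fdiv n (-c) else -Int.fdiv n (-c) - 1 := by
        have := Int.fdiv_neg (a := n) (b := -c) (by omega)
        simpa [PySem.Int.floordiv] using this
      have hmz : PySem.Int.mod n c = 0 ↔ c ∣ n := PySem.Int.mod_eq_zero_iff_dvd n c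
      by_cases hz : PySem.Int.mod n c = 0
      · have hdv : (-c) ∣ n := (neg_dvd).mpr (hmz.mp hz)
        rw [hr, if_pos hz, hfd, if_pos hdv]; omega
      · have hdv : ¬ (-c) ∣ n := fun h => hz (hmz.mpr ((neg_dvd).mp h))
        rw [hr, if_neg hz, hfd, if_neg hdv]; omega
    exact pv_rows_nonpos msg c r hr0 hA hB
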